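-- pv_equiv track=rewrite | github.com/aphymi/advent-of-code | y2018/day06.py | closest
-- ===== SOURCE A (Python) =====
-- def closest(coords, x, y):
-- 	closest_dist = float("inf")
-- 	closest_coord = None
-- 	tie = False
--
-- 	for cx, cy in coords:
-- 		dist = abs(cx-x) + abs(cy-y)
-- 		if dist < closest_dist:
-- 			closest_coord = (cx, cy)
-- 			closest_dist = dist
-- 			tie = False
-- 		elif dist == closest_dist:
-- 			tie = True
--
-- 	return closest_coord if not tie else None
-- ===== SOURCE B (Python) =====
-- def closest(coords, x, y):
--     if not coords:
--         return None
--     dists = [(abs(cx - x) + abs(cy - y), (cx, cy)) for cx, cy in coords]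
--     min_dist = min(d for d, _ in dists)
--     winners = [c for d, c in dists if d == min_dist]
--     return winners[0] if len(winners) == 1 else None
-- ===== Notes on version B (the rewrite author's own statement) =====
-- stated objective: simpler
-- what changed: Replaces the fused single scan with a running min / first-winner / resetting tie flag by a plain compute-distance-table, take the minimum, then filter-the-winners decomposition (unique winner or None).
import Mathlib
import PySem

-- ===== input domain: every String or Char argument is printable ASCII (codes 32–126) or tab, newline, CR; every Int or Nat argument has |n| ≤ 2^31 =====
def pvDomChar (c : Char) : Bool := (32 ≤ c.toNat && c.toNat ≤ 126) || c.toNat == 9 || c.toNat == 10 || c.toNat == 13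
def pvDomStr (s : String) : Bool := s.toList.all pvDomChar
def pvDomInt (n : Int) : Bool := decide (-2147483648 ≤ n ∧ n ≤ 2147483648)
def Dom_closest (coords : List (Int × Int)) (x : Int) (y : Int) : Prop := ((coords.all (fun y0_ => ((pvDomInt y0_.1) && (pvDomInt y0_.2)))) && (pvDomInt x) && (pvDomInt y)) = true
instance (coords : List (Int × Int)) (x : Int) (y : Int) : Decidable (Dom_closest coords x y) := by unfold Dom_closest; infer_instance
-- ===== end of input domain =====

-- B replaces A's fused scan (running min + first-winner coord + resetting tie flag) by a plain
-- compute-distances / take-minimum / filter-winners decomposition; objective: simpler.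

-- ===== PORT A =====
-- loop state = (closest_dist, closest_coord, tie); `none` in the first component is float("inf")
def stepA (x y : Int) (st : Option Int × Option (Int × Int) × Bool) (p : Int × Int) :
    Option Int × Option (Int × Int) × Bool :=
  let dist := |p.1 - x| + |p.2 - y|
  match st with
  | (none, _, _) => (some dist, some p, false)
  | (some cd, cc, t) =>
    if dist < cd then (some dist, some p, false)
    else if dist = cd then (some cd, cc, true)
    else (some cd, cc, t)

def closest (coords : List (Int × Int)) (x : Int) (y : Int) : Option (Int × Int) :=
  let s := coords.foldl (stepA x y) (none, none, false)
  if s.2.2 then none else s.2.1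

-- ===== PORT B =====
def closest_alt (coords : List (Int × Int)) (x : Int) (y : Int) : Option (Int × Int) :=
  if coords = [] then none
  else
    let dists := coords.map (fun p => (|p.1 - x| + |p.2 - y|, p))
    match PySem.List.min? (dists.map Prod.fst) (fun d => d) with
    | none => none
    | some m =>
      let winners := (dists.filter (fun q => q.1 == m)).map Prod.snd
      if winners.length = 1 then winners[0]? else none

-- ===== PRECONDITION & SPEC =====
def Spec_closest (coords : List (Int × Int)) (x : Int) (y : Int) (out : Option (Int × Int)) : Prop := out = closest_alt coords x y
instance (coords : List (Int × Int)) (x : Int) (y : Int) (out : Option (Int × Int)) : Decidable (Spec_closest coords x y out) := by unfold Spec_closest; infer_instance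

-- ===== CLAIM (what is proved, stated in full; the proofs are below) =====
def Claim_equal_closest : Prop := ∀ (coords : List (Int × Int)) (x : Int) (y : Int), Dom_closest coords x y → Spec_closest coords x y (closest coords x y)

-- ===== LEMMAS AND PROOFS =====

-- Manhattan distance of p to (x, y)
def dA (x y : Int) (p : Int × Int) : Int := |p.1 - x| + |p.2 - y|

-- running minimum of the distances of l, seeded with m
def mA (x y m : Int) (l : List (Int × Int)) : Int := (l.map (dA x y)).foldl min m

-- the elements of l at distance exactly v
def fA (x y v : Int) (l : List (Int × Int)) : List (Int × Int) :=
  l.filter (fun p => dA x y p == v)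

lemma mA_le (x y m : Int) (l : List (Int × Int)) : mA x y m l ≤ m :=
  (PySem.List.foldl_min_le _ _).1

lemma mA_cons (x y m : Int) (p : Int × Int) (l : List (Int × Int)) :
    mA x y m (p :: l) = mA x y (min m (dA x y p)) l := rfl

-- A's loop from a live state (some m, some c, t), characterised by min / first winner / winner count
lemma foldA_spec (x y : Int) (l : List (Int × Int)) :
    ∀ (m : Int) (c : Int × Int) (t : Bool),
    l.foldl (stepA x y) (some m, some c, t) =
      (some (mA x y m l),
       some (if mA x y m l < m then (fA x y (mA x y m l) l).headI else c),
       if mA x y m l < m then decide (2 ≤ (fA x y (mA x y m l) l).length)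
       else (t || decide (1 ≤ (fA x y m l).length))) := by
  induction l with
  | nil =>
    intro m c t
    simp [mA, fA]
  | cons p l ih =>
    intro m c t
    have hle : mA x y (min m (dA x y p)) l ≤ min m (dA x y p) := mA_le ..
    rcases lt_trichotomy (dA x y p) m with h | h | h
    · -- dist < m : state resets
      have h' : |p.1 - x| + |p.2 - y| < m := h
      have hstep : stepA x y (some m, some c, t) p = (some (dA x y p), some p, false) := by
        simp [stepA, h', dA]
      rw [List.foldl_cons, hstep, ih, mA_cons]
      have hmin : min m (dA x y p) = dA x y p := min_eq_right h.le
      rw [hmin]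
      rcases lt_or_eq_of_le hle with h2 | h2
      · -- strictly smaller min appears later: p not a winner
        rw [hmin] at h2
        have hne : (dA x y p == mA x y (dA x y p) l) = false := by
          simp; omega
        have hflt : fA x y (mA x y (dA x y p) l) (p :: l) = fA x y (mA x y (dA x y p) l) l := by
          simp [fA, hne]
        have hm : mA x y (dA x y p) l < m := lt_trans h2 h
        simp [hflt, h2, hm]
      · -- p achieves the min
        rw [hmin] at h2
        have hm : mA x y (dA x y p) l < m := by omega
        have hcons : fA x y (mA x y (dA x y p) l) (p :: l)
            = p :: fA x y (mA x y (dA x y p) l) l := by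
          simp [fA, h2]
        have hself : fA x y (dA x y p) l = fA x y (mA x y (dA x y p) l) l := by rw [h2]
        have hd : decide (1 ≤ (fA x y (mA x y (dA x y p) l) l).length)
            = decide (2 ≤ (fA x y (mA x y (dA x y p) l) l).length + 1) := by
          rw [decide_eq_decide]; omega
        simp only [not_lt.mpr h2.ge, hm, if_true, if_false, hcons, hself,
          List.headI_cons, List.length_cons, Bool.false_or, hd]
    · -- dist = m : tie is set
      have h'' : |p.1 - x| + |p.2 - y| = m := h
      have hstep : stepA x y (some m, some c, t) p = (some m, some c, true) := by
        simp [stepA, h'']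
      rw [List.foldl_cons, hstep, ih, mA_cons]
      have hmin : min m (dA x y p) = m := by simp [h.symm.le]
      rw [hmin]
      rcases lt_or_eq_of_le hle with h2 | h2 <;> rw [hmin] at h2
      · have hne : (dA x y p == mA x y m l) = false := by
          simp only [beq_eq_false_iff_ne, ne_eq]
          intro hc; rw [h] at hc; omega
        have hflt : fA x y (mA x y m l) (p :: l) = fA x y (mA x y m l) l := by
          simp [fA, hne]
        simp [h2, hflt]
      · have hcons : fA x y m (p :: l) = p :: fA x y m l := by simp [fA, h]
        simp [h2, hcons]
    · -- dist > m : state unchanged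
      have hgt : m < |p.1 - x| + |p.2 - y| := h
      have h' : ¬ (|p.1 - x| + |p.2 - y| < m) := by omega
      have h'' : ¬ (|p.1 - x| + |p.2 - y| = m) := by omega
      have hstep : stepA x y (some m, some c, t) p = (some m, some c, t) := by
        simp [stepA, h', h'']
      rw [List.foldl_cons, hstep, ih, mA_cons]
      have hmin : min m (dA x y p) = m := by simp [h.le]
      rw [hmin]
      rcases lt_or_eq_of_le hle with h2 | h2 <;> rw [hmin] at h2
      · have hne : (dA x y p == mA x y m l) = false := by
          simp only [beq_eq_false_iff_ne, ne_eq]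
          intro hc; have h3 := mA_le x y m l; rw [← hc] at h3; omega
        have hflt : fA x y (mA x y m l) (p :: l) = fA x y (mA x y m l) l := by
          simp [fA, hne]
        simp [h2, hflt]
      · have hne : (dA x y p == m) = false := by
          simp only [beq_eq_false_iff_ne, ne_eq]
          intro hc; omega
        have hflt : fA x y m (p :: l) = fA x y m l := by
          simp [fA, hne]
        simp [h2, hflt]

lemma winners_eq (x y M : Int) (L : List (Int × Int)) :
    ((L.map (fun p => (|p.1 - x| + |p.2 - y|, p))).filter (fun q => q.1 == M)).map Prod.snd
      = fA x y M L := by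
  rw [List.filter_map, List.map_map]
  simp [fA, dA, Function.comp_def]

lemma fA_ne_nil (x y M : Int) (l : List (Int × Int)) (h : M ∈ l.map (dA x y)) :
    fA x y M l ≠ [] := by
  obtain ⟨q, hq, hdq⟩ := List.mem_map.mp h
  intro hnil
  have := List.filter_eq_nil_iff.mp hnil q hq
  simp [hdq] at this

theorem closest_eq (coords : List (Int × Int)) (x : Int) (y : Int) :
    closest coords x y = closest_alt coords x y := by
  match coords with
  | [] => rfl
  | p :: l =>
    have hstep0 : stepA x y (none, none, false) p
        = (some (dA x y p), some p, false) := rfl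
    rw [closest]
    simp only [List.foldl_cons, hstep0, foldA_spec]
    set M := mA x y (dA x y p) l with hM
    have hle : M ≤ dA x y p := mA_le ..
    rw [closest_alt]
    simp only [if_neg (List.cons_ne_nil p l)]
    have hmap : ((p :: l).map (fun p => (|p.1 - x| + |p.2 - y|, p))).map Prod.fst
        = dA x y p :: l.map (dA x y) := by
      simp [List.map_map, Function.comp, dA]
    rw [hmap, PySem.List.min?_id_cons]
    have hfold : (l.map (dA x y)).foldl min (dA x y p) = M := rfl
    rw [hfold]
    simp only [winners_eq]
    rcases lt_or_eq_of_le hle with h | h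
    · -- the min is achieved strictly inside l; p is not a winner
      have hmem : M ∈ l.map (dA x y) := by
        rcases PySem.List.foldl_min_mem (l.map (dA x y)) (dA x y p) with h' | h'
        · exact absurd (hfold.symm.trans h') (by omega)
        · exact hfold ▸ h'
      have hne : (dA x y p == M) = false := by
        simp only [beq_eq_false_iff_ne, ne_eq]; omega
      have hflt : fA x y M (p :: l) = fA x y M l := by simp [fA, hne]
      have hpos : 1 ≤ (fA x y M l).length :=
        List.length_pos_iff.mpr (fA_ne_nil x y M l hmem)
      rw [hflt]
      by_cases h2 : 2 ≤ (fA x y M l).length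
      · simp [h, h2]; omega
      · have hlen : (fA x y M l).length = 1 := by omega
        obtain ⟨w, ws, hw⟩ := List.exists_cons_of_ne_nil (fA_ne_nil x y M l hmem)
        simp [h, h2, hw]
        simp [hw] at hlen
        simp [hlen]
    · -- p itself achieves the min
      have hcons : fA x y M (p :: l) = p :: fA x y M l := by
        simp [fA, h]
      have hself : fA x y (dA x y p) l = fA x y M l := by rw [h]
      rw [hcons]
      by_cases h1 : 1 ≤ (fA x y M l).length
      · simp only [not_lt.mpr h.ge, if_false, hself, Bool.false_or]
        rw [decide_eq_true h1]
        simp only [if_true, List.length_cons]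
        rw [if_neg (by omega)]
      · have hlen : (fA x y M l).length = 0 := by omega
        simp [not_lt.mpr h.ge, hself, hlen]

-- ===== VERDICT (by name: the statement is the Claim_ definition above) =====
theorem closest_spec : Claim_equal_closest := by
  intro coords x y _
  show closest coords x y = closest_alt coords x y
  exact closest_eq coords x y
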